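-- pv_equiv track=rewrite | github.com/Jairclaros/Borrador-Segundo-Parcial- | Versiones antiguas (pruebas)/funciones_jair.py | ocultar_palabras
-- ===== SOURCE A (Python) =====
-- def listar_palabras(palabras_asociadas: list, palabras_descubiertas: list):
--
--     palabras_total = []
--
--     for i in range(len(palabras_asociadas)):
--         palabras_total.append(palabras_asociadas[i])
--
--     for i in range(len(palabras_descubiertas)):
--         repetido = False
--
--         for j in range(len(palabras_total)):
--             if palabras_descubiertas[i] == palabras_total[j]:
--                 repetido = True
--                 break
--
--         if repetido == False:
--             palabras_total.append(palabras_descubiertas[i])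
--
--     return palabras_total
--
-- def ocultar_palabras(palabras_asociadas: list, palabras_descubiertas: list):
--
--     palabras_total = listar_palabras(palabras_asociadas, palabras_descubiertas)
--
--     ocultas = []
--
--     for i in range(len(palabras_total)):
--         encontrada = False
--
--         for j in range(len(palabras_descubiertas)):
--             if palabras_total[i] == palabras_descubiertas[j]:
--                 encontrada = True
--                 break
--
--         if encontrada:
--             ocultas.append(palabras_total[i])
--         else:
--             ocultas.append("" * len(palabras_total[i]))
--
--     return ocultas
-- ===== SOURCE B (Python) =====
-- def ocultar_palabras(palabras_asociadas: list, palabras_descubiertas: list):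
--     desc_set = set(palabras_descubiertas)
--     resultado = [w if w in desc_set else "" * len(w) for w in palabras_asociadas]
--     seen = set(palabras_asociadas)
--     for w in palabras_descubiertas:
--         if w not in seen:
--             resultado.append(w)
--             seen.add(w)
--     return resultado
-- ===== Notes on version B (the rewrite author's own statement) =====
-- stated objective: simpler
-- what changed: Drops the intermediate merged list and both quadratic inner scans: one comprehension masks the asociadas against a prebuilt set of descubiertas, then a single pass over descubiertas with a seen-set appends the new words (which are always discovered, hence unmasked).
import Mathlib
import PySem

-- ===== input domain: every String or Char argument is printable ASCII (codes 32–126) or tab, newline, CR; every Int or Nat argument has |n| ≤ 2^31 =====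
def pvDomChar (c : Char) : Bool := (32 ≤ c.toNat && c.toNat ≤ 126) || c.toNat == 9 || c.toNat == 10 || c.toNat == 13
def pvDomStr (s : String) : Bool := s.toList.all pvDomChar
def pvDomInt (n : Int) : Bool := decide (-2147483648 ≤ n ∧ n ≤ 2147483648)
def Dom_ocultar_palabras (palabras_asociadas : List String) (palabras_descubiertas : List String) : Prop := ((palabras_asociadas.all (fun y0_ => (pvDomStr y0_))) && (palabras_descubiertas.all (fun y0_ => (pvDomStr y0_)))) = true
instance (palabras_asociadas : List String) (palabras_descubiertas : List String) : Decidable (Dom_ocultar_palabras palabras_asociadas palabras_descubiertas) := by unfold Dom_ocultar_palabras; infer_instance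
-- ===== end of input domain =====

-- B replaces A's three quadratic scanning passes by one masking comprehension over a
-- prebuilt set plus one seen-set pass appending new discovered words (objective: simpler).

-- ===== PORT A =====
-- the inner 'for j … if == : found = True; break' loop of A (both occurrences)
def pyScan (t : String) : List String → Bool
  | [] => false
  | x :: xs => if t == x then true else pyScan t xs

def listar_palabras (palabras_asociadas : List String) (palabras_descubiertas : List String) : List String :=
  let palabras_total := palabras_asociadas.foldl (fun acc w => acc ++ [w]) []
  palabras_descubiertas.foldl
    (fun palabras_total w => if pyScan w palabras_total then palabras_total else palabras_total ++ [w])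
    palabras_total

def ocultar_palabras (palabras_asociadas : List String) (palabras_descubiertas : List String) : List String :=
  let palabras_total := listar_palabras palabras_asociadas palabras_descubiertas
  -- Python's '"" * len(w)' is the empty string for every length, ported as ""
  palabras_total.foldl
    (fun ocultas w => if pyScan w palabras_descubiertas then ocultas ++ [w] else ocultas ++ [""])
    []

-- ===== PORT B =====
def ocultar_palabras_alt (palabras_asociadas : List String) (palabras_descubiertas : List String) : List String :=
  let desc_set : PySem.Set String := PySem.Set.ofList palabras_descubiertas
  -- '"" * len(w)' is "" for every length
  let resultado := palabras_asociadas.map (fun w => if PySem.Set.contains desc_set w then w else "")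
  let final := palabras_descubiertas.foldl
    (fun (st : List String × PySem.Set String) w =>
      if PySem.Set.contains st.2 w then st else (st.1 ++ [w], PySem.Set.add st.2 w))
    (resultado, PySem.Set.ofList palabras_asociadas)
  final.1

-- ===== PRECONDITION & SPEC =====
def Spec_ocultar_palabras (palabras_asociadas : List String) (palabras_descubiertas : List String) (out : List String) : Prop := out = ocultar_palabras_alt palabras_asociadas palabras_descubiertas
instance (palabras_asociadas : List String) (palabras_descubiertas : List String) (out : List String) : Decidable (Spec_ocultar_palabras palabras_asociadas palabras_descubiertas out) := by unfold Spec_ocultar_palabras; infer_instance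

-- ===== CLAIM (what is proved, stated in full; the proofs are below) =====
def Claim_equal_ocultar_palabras : Prop := ∀ (palabras_asociadas : List String) (palabras_descubiertas : List String), Dom_ocultar_palabras palabras_asociadas palabras_descubiertas → Spec_ocultar_palabras palabras_asociadas palabras_descubiertas (ocultar_palabras palabras_asociadas palabras_descubiertas)

-- ===== LEMMAS AND PROOFS =====

theorem pyScan_iff (t : String) (l : List String) : pyScan t l = true ↔ t ∈ l := by
  induction l with
  | nil => simp [pyScan]
  | cons x xs ih =>
      simp only [pyScan, List.mem_cons]
      by_cases h : t = x
      · simp [h]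
      · simp [h, ih]

-- the parallel-progress invariant: A's dedup loop appends exactly the words B's seen-set loop appends
theorem key_lemma (D : List String) (d tot r : List String) (s : PySem.Set String)
    (hs : ∀ x, x ∈ s ↔ x ∈ tot) (hd : ∀ x ∈ d, x ∈ D) :
    ∃ T, d.foldl (fun tot w => if pyScan w tot then tot else tot ++ [w]) tot = tot ++ T ∧
      (d.foldl (fun (st : List String × PySem.Set String) w =>
          if PySem.Set.contains st.2 w then st else (st.1 ++ [w], PySem.Set.add st.2 w)) (r, s)).1
        = r ++ T ∧
      ∀ x ∈ T, x ∈ D := by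
  induction d generalizing tot r s with
  | nil => exact ⟨[], by simp⟩
  | cons w d' ih =>
      by_cases hw : w ∈ tot
      · have h1 : pyScan w tot = true := (pyScan_iff w tot).mpr hw
        have h2 : w ∈ s := (hs w).mpr hw
        obtain ⟨T, hA, hB, hT⟩ := ih tot r s hs (fun x hx => hd x (List.mem_cons_of_mem _ hx))
        exact ⟨T, by simpa [h1] using hA, by simpa [h2] using hB, hT⟩
      · have h1 : pyScan w tot = false := by
          rw [Bool.eq_false_iff]; intro hc; exact hw ((pyScan_iff w tot).mp hc)
        have h2 : w ∉ s := fun hc => hw ((hs w).mp hc)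
        have hs' : ∀ x, x ∈ PySem.Set.add s w ↔ x ∈ tot ++ [w] := by
          intro x; simp [PySem.Set.mem_add, hs x]
        obtain ⟨T, hA, hB, hT⟩ := ih (tot ++ [w]) (r ++ [w]) (PySem.Set.add s w) hs'
          (fun x hx => hd x (List.mem_cons_of_mem _ hx))
        refine ⟨w :: T, ?_, ?_, ?_⟩
        · simpa [h1, List.append_assoc] using hA
        · simpa [h2, List.append_assoc] using hB
        · intro x hx
          rcases List.mem_cons.mp hx with h | h
          · exact h ▸ hd w List.mem_cons_self
          · exact hT x h

theorem ocultar_palabras_eq (a d : List String) :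
    ocultar_palabras a d = ocultar_palabras_alt a d := by
  unfold ocultar_palabras ocultar_palabras_alt listar_palabras
  have hfirst : a.foldl (fun acc w => acc ++ [w]) [] = a := by
    simpa using PySem.List.foldl_append_singleton a ([] : List String)
  rw [hfirst]
  obtain ⟨T, hA, hB, hT⟩ := key_lemma d d a
    (a.map (fun w => if PySem.Set.contains (PySem.Set.ofList d) w then w else ""))
    (PySem.Set.ofList a)
    (fun x => PySem.Set.mem_ofList a x) (fun x hx => hx)
  rw [hA, hB]
  -- the masking loop over A's merged list is a map
  have hmask : ∀ (l : List String),
      l.foldl (fun ocultas w => if pyScan w d then ocultas ++ [w] else ocultas ++ [""]) []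
        = l.map (fun w => if pyScan w d then w else "") := by
    intro l
    have hfun : (fun (ocultas : List String) w => if pyScan w d then ocultas ++ [w] else ocultas ++ [""])
        = (fun ocultas w => ocultas ++ [if pyScan w d then w else ""]) := by
      funext oc w; split <;> rfl
    rw [hfun]
    simpa using PySem.List.foldl_append_singleton_eq_map (fun w => if pyScan w d then w else "") l []
  rw [hmask, List.map_append]
  congr 1
  · apply List.map_congr_left
    intro x _
    have : pyScan x d = PySem.Set.contains (PySem.Set.ofList d) x := by
      by_cases h : x ∈ d
      · rw [(pyScan_iff x d).mpr h, eq_comm, PySem.Set.contains_iff]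
        exact (PySem.Set.mem_ofList d x).mpr h
      · have h1 : pyScan x d = false := by
          rw [Bool.eq_false_iff]; intro hc; exact h ((pyScan_iff x d).mp hc)
        have h2 : PySem.Set.contains (PySem.Set.ofList d) x = false := by
          rw [Bool.eq_false_iff]; intro hc
          exact h ((PySem.Set.mem_ofList d x).mp ((PySem.Set.contains_iff _ _).mp hc))
        rw [h1, h2]
    rw [this]
  · have : ∀ x ∈ T, (if pyScan x d then x else "") = x := by
      intro x hx; rw [(pyScan_iff x d).mpr (hT x hx)]; simp
    calc T.map (fun w => if pyScan w d then w else "") = T.map id := List.map_congr_left this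
      _ = T := List.map_id T

-- ===== VERDICT (by name: the statement is the Claim_ definition above) =====
theorem ocultar_palabras_spec : Claim_equal_ocultar_palabras := by
  intro a d _
  unfold Spec_ocultar_palabras
  exact ocultar_palabras_eq a d
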